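-- pv_equiv track=rewrite | github.com/ElenaCherpakova/codewars | 7-kyu/switch-on-the-gravity/switch-on-the-gravity.py | switch_gravity
-- ===== SOURCE A (Python) =====
-- def switch_gravity(lst):
--     height = len(lst)
--     width = len(lst[0])
--     result = [['-' for _ in range(width)] for _ in range(height)]
--
--     for col in range(width):
--         count = 0
--         for row in range(height):
--             if lst[row][col] == "#":
--                 count += 1
--         for row in range(height):
--             if row >= height - count:
--                 result[row][col] = "#"
--             else:
--                 result[row][col] = "-"
--     return result
-- ===== SOURCE B (Python) =====
-- def switch_gravity(lst):
--     height = len(lst)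
--     width = len(lst[0])
--     cols = [sorted(lst[row][col] == "#" for row in range(height)) for col in range(width)]
--     return [["#" if cols[col][row] else "-" for col in range(width)] for row in range(height)]
-- ===== Notes on version B (the rewrite author's own statement) =====
-- stated objective: idiomatic
-- what changed: Replaces the per-column count-then-threshold writes into a preallocated mutable grid by sorting each column's boolean '#'-mask (False sorts before True, so '#' sinks) and rebuilding the grid from the sorted columns with comprehensions.
import Mathlib
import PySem

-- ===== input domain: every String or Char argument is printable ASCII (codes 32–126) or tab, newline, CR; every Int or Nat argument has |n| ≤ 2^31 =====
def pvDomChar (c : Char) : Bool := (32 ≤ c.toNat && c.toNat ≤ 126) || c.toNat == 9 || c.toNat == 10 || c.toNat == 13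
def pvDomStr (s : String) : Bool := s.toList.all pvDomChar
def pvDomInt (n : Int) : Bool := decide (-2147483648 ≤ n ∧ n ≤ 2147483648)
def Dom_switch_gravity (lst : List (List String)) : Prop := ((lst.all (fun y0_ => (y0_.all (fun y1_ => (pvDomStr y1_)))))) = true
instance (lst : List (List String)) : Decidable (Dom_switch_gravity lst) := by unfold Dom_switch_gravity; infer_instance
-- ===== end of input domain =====

-- B rebuilds the grid by sorting each column's boolean '#'-mask instead of A's count-and-threshold writes into a preallocated grid; same values, more idiomatic.


-- ===== PORT A =====
def switch_gravity (lst : List (List String)) : List (List String) :=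
  let height : Int := PySem.List.len lst
  let width : Int := PySem.List.len (PySem.List.pyGetD lst 0 [])
  let result : List (List String) :=
    (PySem.List.pyRange 0 height 1).map (fun _ => (PySem.List.pyRange 0 width 1).map (fun _ => "-"))
  (PySem.List.pyRange 0 width 1).foldl (fun result col =>
    let count : Int := (PySem.List.pyRange 0 height 1).foldl (fun count row =>
      if PySem.List.pyGetD (PySem.List.pyGetD lst row []) col "" = "#" then count + 1 else count) 0
    (PySem.List.pyRange 0 height 1).foldl (fun result row =>
      PySem.List.pySetD result row
        (PySem.List.pySetD (PySem.List.pyGetD result row []) col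
          (if row ≥ height - count then "#" else "-"))) result) result

-- ===== PORT B =====
def switch_gravity_alt (lst : List (List String)) : List (List String) :=
  let height : Int := PySem.List.len lst
  let width : Int := PySem.List.len (PySem.List.pyGetD lst 0 [])
  let cols : List (List Bool) :=
    (PySem.List.pyRange 0 width 1).map (fun col =>
      PySem.List.sorted ((PySem.List.pyRange 0 height 1).map (fun row =>
        PySem.List.pyGetD (PySem.List.pyGetD lst row []) col "" == "#")) (fun x => x) false)
  (PySem.List.pyRange 0 height 1).map (fun row =>
    (PySem.List.pyRange 0 width 1).map (fun col =>
      if PySem.List.pyGetD (PySem.List.pyGetD cols col []) row false then "#" else "-"))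

-- ===== PRECONDITION & SPEC =====
-- Pre_ excludes exactly the inputs where A raises IndexError: the empty list (lst[0]) and
-- grids whose later rows are shorter than the first row (lst[row][col] inside the loops).
def Pre_switch_gravity (lst : List (List String)) : Prop :=
  lst ≠ [] ∧ ∀ r ∈ lst, (lst.headD []).length ≤ r.length
instance (lst : List (List String)) : Decidable (Pre_switch_gravity lst) := by
  unfold Pre_switch_gravity; infer_instance
def pvWitness_switch_gravity : List (List String) := [["#", "-"], ["-", "-"], ["-", "#"]]
def Spec_switch_gravity (lst : List (List String)) (out : List (List String)) : Prop := out = switch_gravity_alt lst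
instance (lst : List (List String)) (out : List (List String)) : Decidable (Spec_switch_gravity lst out) := by unfold Spec_switch_gravity; infer_instance

-- ===== CLAIM (what is proved, stated in full; the proofs are below) =====
def Claim_equal_switch_gravity : Prop := ∀ (lst : List (List String)), Dom_switch_gravity lst → Pre_switch_gravity lst → Spec_switch_gravity lst (switch_gravity lst)

-- ===== LEMMAS AND PROOFS =====

-- sorted of booleans = falses then trues
theorem pv_insF (m k : Nat) :
    PySem.List.insertBy (fun a b : Bool => decide (a < b)) false
      (List.replicate m false ++ List.replicate k true)
    = List.replicate (m+1) false ++ List.replicate k true := by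
  induction m with
  | zero =>
    cases k with
    | zero => simp [PySem.List.insertBy]
    | succ k => simp [PySem.List.insertBy, List.replicate_succ]
  | succ m ih =>
    simp only [List.replicate_succ, List.cons_append, PySem.List.insertBy]
    simp [ih, List.replicate_succ]

theorem pv_insT (m k : Nat) :
    PySem.List.insertBy (fun a b : Bool => decide (a < b)) true
      (List.replicate m false ++ List.replicate k true)
    = List.replicate m false ++ List.replicate (k+1) true := by
  rw [PySem.List.insertBy_of_forall_not_before]
  · simp [List.replicate_succ']
  · intro y hy
    rcases List.mem_append.mp hy with h | h <;> simp [List.eq_of_mem_replicate h]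

theorem pv_sortedBool (bs : List Bool) :
    PySem.List.sorted bs (fun x => x) false
    = List.replicate (bs.count false) false ++ List.replicate (bs.count true) true := by
  rw [PySem.List.sorted_eq_foldl_insertBy]
  suffices h : ∀ (bs : List Bool) (m k : Nat),
      bs.foldl (fun acc x => PySem.List.insertBy (fun a b => decide (a < b)) x acc)
        (List.replicate m false ++ List.replicate k true)
      = List.replicate (m + bs.count false) false ++ List.replicate (k + bs.count true) true by
    simpa using h bs 0 0
  intro bs
  induction bs with
  | nil => simp
  | cons b t ih =>
    intro m k
    cases b with
    | false => simp only [List.foldl_cons, pv_insF, ih, List.count_cons]; simp; ring_nf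
    | true => simp only [List.foldl_cons, pv_insT, ih, List.count_cons]; simp; ring_nf

-- generic: equality from length + getD
theorem pv_eq_of_getD {α : Type} (d : α) (xs ys : List α) (hl : xs.length = ys.length)
    (h : ∀ i, xs.getD i d = ys.getD i d) : xs = ys := by
  apply List.ext_getElem hl
  intro i h1 h2
  have := h i
  rwa [List.getD_eq_getElem _ _ h1, List.getD_eq_getElem _ _ h2] at this

theorem pv_getD_set_ne {α : Type} (xs : List α) (i j : Nat) (v d : α) (h : i ≠ j) :
    (xs.set i v).getD j d = xs.getD j d := by
  simp [List.getD_eq_getElem?_getD, List.getElem?_set_ne h]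

-- writing g c at every index c < n of a row
theorem pv_rowFold (g : Nat → String) (n : Nat) (rv : List String) :
    ((List.range n).foldl (fun rv c => rv.set c (g c)) rv).length = rv.length ∧
    ∀ c, ((List.range n).foldl (fun rv c => rv.set c (g c)) rv).getD c "" =
      if c < n ∧ c < rv.length then g c else rv.getD c "" := by
  induction n with
  | zero => simp
  | succ n ih =>
    rw [List.range_succ, List.foldl_append]
    refine ⟨by simp [ih.1], ?_⟩
    intro c
    simp only [List.foldl_cons, List.foldl_nil]
    by_cases hc : c = n
    · subst hc
      by_cases hlen : c < rv.length
      · rw [List.getD_eq_getElem _ _ (by simp [ih.1]; omega)]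
        rw [List.getElem_set]
        simp [hlen]
      · rw [List.set_eq_of_length_le (by simp [ih.1]; omega)]
        rw [ih.2 c]
        simp [hlen]
    · rw [pv_getD_set_ne _ _ _ _ _ (Ne.symm hc), ih.2 c]
      have : (c < n ∧ c < rv.length) ↔ (c < n + 1 ∧ c < rv.length) := by omega
      rw [if_congr this rfl rfl]

theorem pv_getD_map_range {α : Type} (f : Nat → α) (n i : Nat) (d : α) :
    (((List.range n).map f).getD i d) = if i < n then f i else d := by
  by_cases h : i < n
  · rw [List.getD_eq_getElem _ _ (by simpa using h)]; simp [h]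
  · rw [List.getD_eq_default _ _ (by simpa using Nat.le_of_not_lt h)]; simp [h]

-- one column write pass over the rows
theorem pv_innerFold (c : Nat) (f : Nat → String) (n : Nat) (res : List (List String)) :
    ((List.range n).foldl (fun res r => res.set r ((res.getD r []).set c (f r))) res).length = res.length ∧
    ∀ r, ((List.range n).foldl (fun res r => res.set r ((res.getD r []).set c (f r))) res).getD r [] =
      if r < n ∧ r < res.length then (res.getD r []).set c (f r) else res.getD r [] := by
  induction n with
  | zero => simp
  | succ n ih =>
    rw [List.range_succ, List.foldl_append]
    simp only [List.foldl_cons, List.foldl_nil]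
    refine ⟨by rw [List.length_set, ih.1], ?_⟩
    intro r
    by_cases hr : r = n
    · subst hr
      have hrow : ((List.range r).foldl (fun res r => res.set r ((res.getD r []).set c (f r))) res).getD r []
          = res.getD r [] := by rw [ih.2 r]; simp
      by_cases hlen : r < res.length
      · rw [List.getD_eq_getElem _ _ (by rw [List.length_set, ih.1]; exact hlen)]
        rw [List.getElem_set]
        rw [hrow]
        simp [hlen]
      · rw [List.set_eq_of_length_le (by rw [ih.1]; omega), ih.2 r]
        simp [hlen]
    · rw [pv_getD_set_ne _ _ _ _ _ (Ne.symm hr), ih.2 r]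
      have : (r < n ∧ r < res.length) ↔ (r < n + 1 ∧ r < res.length) := by omega
      rw [if_congr this rfl rfl]

-- the whole column loop, rows independent
theorem pv_outerFold (fA : Nat → Nat → String) (h : Nat) (cs : List Nat) :
    ∀ res : List (List String), res.length = h →
    ((cs.foldl (fun res c => (List.range h).foldl
        (fun res r => res.set r ((res.getD r []).set c (fA c r))) res) res).length = h ∧
     ∀ r, (cs.foldl (fun res c => (List.range h).foldl
        (fun res r => res.set r ((res.getD r []).set c (fA c r))) res) res).getD r [] =
      cs.foldl (fun rv c => rv.set c (fA c r)) (res.getD r [])) := by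
  induction cs with
  | nil => intro res hres; simp [hres]
  | cons c cs ih =>
    intro res hres
    simp only [List.foldl_cons]
    set res' := (List.range h).foldl (fun res r => res.set r ((res.getD r []).set c (fA c r))) res with hres'
    have hlen' : res'.length = h := by rw [hres']; rw [(pv_innerFold c (fA c) h res).1, hres]
    obtain ⟨hl, hg⟩ := ih res' hlen'
    refine ⟨hl, ?_⟩
    intro r
    rw [hg r]
    congr 1
    rw [hres', (pv_innerFold c (fA c) h res).2 r]
    by_cases hr : r < h
    · rw [if_pos ⟨hr, by omega⟩]
    · rw [if_neg (by omega)]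
      rw [List.getD_eq_default _ _ (by omega)]
      rfl
theorem pv_count (q : Nat → Prop) [DecidablePred q] (n : Nat) :
    (List.range n).foldl (fun acc r => if q r then acc + 1 else acc) (0:Int)
    = ((List.range n).countP (fun r => decide (q r)) : Nat) := by
  suffices h : ∀ (a : Int), (List.range n).foldl (fun acc r => if q r then acc + 1 else acc) a
      = a + ((List.range n).countP (fun r => decide (q r)) : Nat) by simpa using h 0
  induction n with
  | zero => simp
  | succ n ih =>
    intro a
    rw [List.range_succ, List.foldl_append, List.countP_append, ih]
    by_cases hq : q n
    · simp [hq]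
      try ring
    · simp [hq]
      try ring

theorem pv_foldl_set_nil (g : Nat → String) (cs : List Nat) :
    cs.foldl (fun rv c => rv.set c (g c)) ([]:List String) = [] := by
  induction cs with
  | nil => rfl
  | cons c cs ih => simpa using ih

theorem pv_getD_ff_tt (a b r : Nat) (hr : r < a + b) :
    ((List.replicate a false ++ List.replicate b true).getD r false) = decide (a ≤ r) := by
  by_cases h : r < a
  · rw [List.getD_eq_getElem _ _ (by simp; omega)]
    rw [List.getElem_append_left (by simpa using h)]
    simp [h]
  · rw [List.getD_eq_getElem _ _ (by simp; omega)]
    rw [List.getElem_append_right (by simpa using h)]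
    simp
    omega

theorem pv_beq_decide (s t : String) : (s == t) = decide (s = t) := by
  rw [Bool.eq_iff_iff]; simp

theorem pv_counts (q : Nat → Bool) (n : Nat) :
    ((List.range n).map q).count true = (List.range n).countP q ∧
    ((List.range n).map q).count false = n - (List.range n).countP q := by
  have ht : ((List.range n).map q).count true = (List.range n).countP q := by
    rw [List.count_eq_countP, List.countP_map]
    simp [Function.comp_def]
  have hsum := List.count_false_add_count_true ((List.range n).map q)
  constructor
  · exact ht
  · have hlen : ((List.range n).map q).length = n := by simp
    omega

theorem pv_bridge (h w : Nat) (q : Nat → Nat → Bool) :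
    (List.range w).foldl
      (fun x c => (List.range h).foldl
        (fun x r => x.set r ((x.getD r []).set c
          (if (↑r:Int) ≥ (↑h:Int) - ↑((List.range h).countP (q c)) then "#" else "-"))) x)
      ((List.range h).map (fun _ => (List.range w).map (fun _ => "-")))
    = (List.range h).map (fun r => (List.range w).map (fun c =>
        if (((List.range w).map (fun c => PySem.List.sorted ((List.range h).map (q c)) (fun x => x) false)).getD c []).getD r false = true
        then "#" else "-")) := by
  have hres0 : ((List.range h).map (fun _ => (List.range w).map (fun _ => ("-":String)))).length = h := by simp
  have hout := pv_outerFold (fun c r => if (↑r:Int) ≥ (↑h:Int) - ↑((List.range h).countP (q c)) then "#" else "-")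
    h (List.range w) _ hres0
  apply pv_eq_of_getD ([]:List String)
  · rw [hout.1]; simp
  · intro r
    rw [hout.2 r]
    by_cases hr : r < h
    · have h0 : ((List.range h).map (fun _ => (List.range w).map (fun _ => ("-":String)))).getD r []
          = (List.range w).map (fun _ => "-") := by rw [pv_getD_map_range]; simp [hr]
      rw [h0, pv_getD_map_range _ h r []]
      rw [if_pos hr]
      have hrow := pv_rowFold (fun c => if (↑r:Int) ≥ (↑h:Int) - ↑((List.range h).countP (q c)) then "#" else "-")
        w ((List.range w).map (fun _ => "-"))
      apply pv_eq_of_getD ""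
      · rw [hrow.1]; simp
      · intro c
        rw [hrow.2 c, pv_getD_map_range _ w c ""]
        by_cases hc : c < w
        · rw [if_pos ⟨hc, by simpa using hc⟩]
          rw [pv_getD_map_range _ w c "", if_pos hc]
          rw [pv_getD_map_range _ w c [], if_pos hc]
          rw [pv_sortedBool, pv_getD_ff_tt _ _ _ (by
            have := (pv_counts (q c) h).1
            have := (pv_counts (q c) h).2
            have hK : (List.range h).countP (q c) ≤ h := by
              simpa using List.countP_le_length (l := List.range h) (p := q c)
            omega)]
          rw [(pv_counts (q c) h).2]
          have hK : (List.range h).countP (q c) ≤ h := by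
            simpa using List.countP_le_length (l := List.range h) (p := q c)
          by_cases hcond : (↑r:Int) ≥ (↑h:Int) - ↑((List.range h).countP (q c))
          · rw [if_pos hcond, if_pos (by simp; omega)]
          · rw [if_neg hcond, if_neg (by simp; omega)]
        · rw [if_neg (by omega), if_neg hc]
          have hlenrow : (((List.range w).map (fun c => PySem.List.sorted ((List.range h).map (q c)) (fun x => x) false)).getD c []) = [] := by
            rw [pv_getD_map_range]; simp [hc]
          rw [pv_getD_map_range _ w c "", if_neg hc]
    · rw [List.getD_eq_default _ _ (by rw [hres0]; omega)]
      rw [List.getD_eq_default _ _ (by simp; omega)]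
      exact pv_foldl_set_nil _ _



theorem pv_main (lst : List (List String)) : switch_gravity lst = switch_gravity_alt lst := by
  unfold switch_gravity switch_gravity_alt
  simp only [PySem.List.len_eq, PySem.List.pyGetD_zero, PySem.List.pyRange_zero_natCast,
    List.foldl_map, List.map_map, Function.comp_def, PySem.List.pyGetD_natCast,
    PySem.List.pySetD_natCast, pv_count, pv_beq_decide]
  exact pv_bridge lst.length (lst.getD 0 []).length (fun c r => decide ((lst.getD r []).getD c "" = "#"))

-- ===== VERDICT (by name: the statement is the Claim_ definition above) =====
theorem switch_gravity_spec : Claim_equal_switch_gravity := by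
  intro lst _ _
  unfold Spec_switch_gravity
  exact pv_main lst
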